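-- pv_equiv track=rewrite | github.com/max-f/advent-of-code | 2019/d08.py | part1
-- ===== SOURCE A (Python) =====
-- def part1(input_txt) -> int:
--     layer_size = 25 * 6
--     layers = []
--     for idx in range(0, len(input_txt), layer_size):
--         layer = input_txt[idx:idx + layer_size]
--         layers.append(layer)
--     min_layer = min(layers, key=lambda l: sum(p == '0' for p in l))
--     twos = len([x for x in min_layer if x == '2'])
--     ones = len([x for x in min_layer if x == '1'])
--     return twos * ones
-- ===== SOURCE B (Python) =====
-- def part1(input_txt) -> int:
--     layer_size = 25 * 6
--     n_layers = -(-len(input_txt) // layer_size)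
--     counts = [[0, 0, 0] for _ in range(n_layers)]
--     for i, ch in enumerate(input_txt):
--         d = ord(ch) - 48
--         if 0 <= d <= 2:
--             counts[i // layer_size][d] += 1
--     best = min(counts, key=lambda c: c[0])
--     return best[1] * best[2]
-- ===== Notes on version B (the rewrite author's own statement) =====
-- stated objective: alternative
-- what changed: B never slices the input into layer strings: it allocates one (zeros,ones,twos) count-table per layer up front and makes a single character-level pass over the whole string, bucketing each digit into its layer's table by i // 150, then takes min over the tables by zero count and multiplies the stored ones and twos; A builds a list of 150-char layer strings, calls min with a key that re-sums zeros per layer, and re-scans the winning layer twice with filters.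
import Mathlib
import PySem

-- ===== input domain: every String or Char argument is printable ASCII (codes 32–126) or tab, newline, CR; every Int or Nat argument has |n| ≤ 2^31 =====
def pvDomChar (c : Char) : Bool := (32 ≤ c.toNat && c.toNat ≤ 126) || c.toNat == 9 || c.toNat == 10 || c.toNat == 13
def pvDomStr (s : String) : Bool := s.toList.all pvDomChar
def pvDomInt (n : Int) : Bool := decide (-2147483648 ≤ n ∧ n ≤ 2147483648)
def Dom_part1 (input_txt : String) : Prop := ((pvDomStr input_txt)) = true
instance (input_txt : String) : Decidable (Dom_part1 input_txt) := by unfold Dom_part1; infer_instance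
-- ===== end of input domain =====

-- B never slices the input into layer strings: it allocates one count-table per layer up front and
-- makes a single character-level pass, bucketing each digit by i // 150 (objective: alternative).

-- ===== PORT A =====
def part1 (input_txt : String) : Int :=
  let cs := input_txt.toList
  let layerSize : Int := 25 * 6
  let layers : List (List Char) :=
    (PySem.List.pyRange 0 (cs.length : Int) layerSize).foldl
      (fun acc idx => acc ++ [PySem.List.slice cs (some idx) (some (idx + layerSize))]) []
  match PySem.List.min? layers
      (fun l => ((l.map (fun p => if p = '0' then (1 : Int) else 0)).sum)) with
  | none => 0   -- Python's min([]) raises ValueError here; excluded by Pre_part1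
  | some minLayer =>
    let twos : Int := ((minLayer.filter (fun x => x = '2')).length : Int)
    let ones : Int := ((minLayer.filter (fun x => x = '1')).length : Int)
    twos * ones

-- ===== PORT B =====
-- Python's per-layer [0,0,0] table (indexed by the digit d = ord(ch)-48) is the triple
-- (zeros, ones, twos); 'counts[i//150][d] += 1' is the d-branch bump below.
def part1_alt (input_txt : String) : Int :=
  let cs := input_txt.toList
  let layerSize : Int := 25 * 6
  let nLayers : Int := -(PySem.Int.floordiv (-(cs.length : Int)) layerSize)
  let counts0 : List (Int × Int × Int) :=
    (PySem.List.pyRange 0 nLayers 1).map (fun _ => ((0, 0, 0) : Int × Int × Int))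
  let counts := (PySem.List.enumerate cs).foldl
    (fun (C : List (Int × Int × Int)) p =>
      let d : Int := (p.2.toNat : Int) - 48
      if 0 ≤ d ∧ d ≤ 2 then
        C.modify (PySem.Int.floordiv p.1 layerSize).toNat
          (fun t => if d = 0 then (t.1 + 1, t.2.1, t.2.2)
                    else if d = 1 then (t.1, t.2.1 + 1, t.2.2)
                    else (t.1, t.2.1, t.2.2 + 1))
      else C) counts0
  match PySem.List.min? counts (fun c => c.1) with
  | none => 0   -- Python's min([]) raises ValueError here; excluded by Pre_part1
  | some b => b.2.1 * b.2.2

-- ===== PRECONDITION & SPEC =====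
-- On the empty string both A and B raise ValueError (min() of an empty sequence); excluded.
def Pre_part1 (input_txt : String) : Prop := input_txt ≠ ""
instance (input_txt : String) : Decidable (Pre_part1 input_txt) := by unfold Pre_part1; infer_instance
def pvWitness_part1 : String := "012210"

def Spec_part1 (input_txt : String) (out : Int) : Prop := out = part1_alt input_txt
instance (input_txt : String) (out : Int) : Decidable (Spec_part1 input_txt out) := by unfold Spec_part1; infer_instance

-- ===== CLAIM (what is proved, stated in full; the proofs are below) =====
def Claim_equal_part1 : Prop := ∀ (input_txt : String), Dom_part1 input_txt → Pre_part1 input_txt → Spec_part1 input_txt (part1 input_txt)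

-- ===== LEMMAS AND PROOFS =====

-- What B's bucketed bump does to the table of the layer a character lands in.
def pvUpd (ch : Char) (t : Int × Int × Int) : Int × Int × Int :=
  let d : Int := (ch.toNat : Int) - 48
  if 0 ≤ d ∧ d ≤ 2 then
    if d = 0 then (t.1 + 1, t.2.1, t.2.2)
    else if d = 1 then (t.1, t.2.1 + 1, t.2.2)
    else (t.1, t.2.1, t.2.2 + 1)
  else t

-- The (zeros, ones, twos) table of one layer.
def pvTri (l : List Char) : Int × Int × Int :=
  ((l.countP (fun ch => ch.toNat == 48) : Int),
   (l.countP (fun ch => ch.toNat == 49) : Int),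
   (l.countP (fun ch => ch.toNat == 50) : Int))

-- The 150-character layers, as a structural recursion (proof-side view of both programs).
def pvChunks : List Char → List (List Char)
  | [] => []
  | c :: rest => ((c :: rest).take 150) :: pvChunks ((c :: rest).drop 150)
termination_by l => l.length
decreasing_by simp

theorem pvModify_id {α : Type} (l : List α) (i : Nat) : l.modify i (fun x => x) = l := by
  induction l generalizing i with
  | nil => simp
  | cons a t ih => cases i <;> simp [List.modify_cons, ih]

theorem pvChar_eq_iff (c : Char) (m : Nat) (c' : Char) (hm : c'.toNat = m) :
    (c = c') ↔ c.toNat = m := by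
  subst hm
  constructor
  · intro h; rw [h]
  · intro h; exact Char.ext (UInt32.toNat_inj.mp h)

-- B's step function, uniformly as a modify with pvUpd.
theorem pvStep_eq :
    (fun (C : List (Int × Int × Int)) (p : Int × Char) =>
      let d : Int := (p.2.toNat : Int) - 48
      if 0 ≤ d ∧ d ≤ 2 then
        C.modify (PySem.Int.floordiv p.1 150).toNat
          (fun t => if d = 0 then (t.1 + 1, t.2.1, t.2.2)
                    else if d = 1 then (t.1, t.2.1 + 1, t.2.2)
                    else (t.1, t.2.1, t.2.2 + 1))
      else C)
    = (fun C p => C.modify (PySem.Int.floordiv p.1 150).toNat (pvUpd p.2)) := by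
  funext C p
  dsimp only [pvUpd]
  by_cases hc : (0 : Int) ≤ (p.2.toNat : Int) - 48 ∧ (p.2.toNat : Int) - 48 ≤ 2
  · rw [if_pos hc]
    congr 1
    funext t
    dsimp only [pvUpd]
    rw [if_pos hc]
  · rw [if_neg hc]
    have h2 : pvUpd p.2 = fun x => x := by
      funext t
      dsimp only [pvUpd]
      rw [if_neg hc]
    rw [h2, pvModify_id]

-- Characters enumerated from i+150 never touch the head bucket.
theorem pvShift (cs : List Char) (i : Int) (hi : 0 ≤ i) (h : Int × Int × Int)
    (t : List (Int × Int × Int)) :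
    (PySem.List.enumerate cs (i + 150)).foldl
      (fun C p => C.modify (PySem.Int.floordiv p.1 150).toNat (pvUpd p.2)) (h :: t)
    = h :: (PySem.List.enumerate cs i).foldl
      (fun C p => C.modify (PySem.Int.floordiv p.1 150).toNat (pvUpd p.2)) t := by
  induction cs generalizing i h t with
  | nil => simp [PySem.List.enumerate]
  | cons c cs ih =>
    rw [PySem.List.enumerate_cons, PySem.List.enumerate_cons, List.foldl_cons, List.foldl_cons]
    have key : (PySem.Int.floordiv (i + 150) 150).toNat
        = (PySem.Int.floordiv i 150).toNat + 1 := by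
      rw [PySem.Int.floordiv_eq_ediv_of_pos (by norm_num),
        PySem.Int.floordiv_eq_ediv_of_pos (by norm_num)]
      omega
    rw [key, List.modify_cons]
    simp only [Nat.succ_ne_zero, if_false, Nat.add_sub_cancel]
    rw [show i + 150 + 1 = (i + 1) + 150 by ring, ih (i + 1) (by omega)]

-- Characters enumerated below 150 all land in the head bucket.
theorem pvHead (cs : List Char) (i : Nat) (hle : i + cs.length ≤ 150) (h : Int × Int × Int)
    (t : List (Int × Int × Int)) :
    (PySem.List.enumerate cs (i : Int)).foldl
      (fun C p => C.modify (PySem.Int.floordiv p.1 150).toNat (pvUpd p.2)) (h :: t)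
    = (cs.foldl (fun acc ch => pvUpd ch acc) h) :: t := by
  induction cs generalizing i h with
  | nil => simp [PySem.List.enumerate]
  | cons c cs ih =>
    rw [PySem.List.enumerate_cons, List.foldl_cons, List.foldl_cons]
    have key : (PySem.Int.floordiv (i : Int) 150).toNat = 0 := by
      rw [PySem.Int.floordiv_eq_ediv_of_pos (by norm_num)]
      simp at hle
      omega
    rw [key, List.modify_cons, if_pos rfl]
    rw [show ((i : Int) + 1) = ((i + 1 : Nat) : Int) by push_cast; ring,
      ih (i + 1) (by simp at hle ⊢; omega)]

theorem pvHead0 (cs : List Char) (hle : cs.length ≤ 150) (h : Int × Int × Int)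
    (t : List (Int × Int × Int)) :
    (PySem.List.enumerate cs 0).foldl
      (fun C p => C.modify (PySem.Int.floordiv p.1 150).toNat (pvUpd p.2)) (h :: t)
    = (cs.foldl (fun acc ch => pvUpd ch acc) h) :: t := by
  simpa using pvHead cs 0 (by omega) h t

theorem pvShift0 (cs : List Char) (h : Int × Int × Int) (t : List (Int × Int × Int)) :
    (PySem.List.enumerate cs 150).foldl
      (fun C p => C.modify (PySem.Int.floordiv p.1 150).toNat (pvUpd p.2)) (h :: t)
    = h :: (PySem.List.enumerate cs 0).foldl
      (fun C p => C.modify (PySem.Int.floordiv p.1 150).toNat (pvUpd p.2)) t := by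
  simpa using pvShift cs 0 le_rfl h t

-- Accumulating pvUpd over a layer adds its pvTri table.
theorem pvPerLayer (l : List Char) (h : Int × Int × Int) :
    l.foldl (fun acc ch => pvUpd ch acc) h
    = (h.1 + (pvTri l).1, h.2.1 + (pvTri l).2.1, h.2.2 + (pvTri l).2.2) := by
  induction l generalizing h with
  | nil => simp [pvTri]
  | cons c l ih =>
    rw [List.foldl_cons, ih]
    by_cases h48 : c.toNat = 48
    · simp [pvUpd, pvTri, h48]
      omega
    · by_cases h49 : c.toNat = 49
      · simp [pvUpd, pvTri, h49]
        omega
      · by_cases h50 : c.toNat = 50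
        · simp [pvUpd, pvTri, h50]
          omega
        · have hcond : ¬(48 ≤ c.toNat ∧ c.toNat ≤ 50) := by omega
          simp [pvUpd, pvTri, h48, h49, h50, hcond]

-- The whole bucketing pass produces exactly the per-layer tables, in layer order.
theorem pvBucketMain (cs : List Char) :
    (PySem.List.enumerate cs 0).foldl
      (fun C p => C.modify (PySem.Int.floordiv p.1 150).toNat (pvUpd p.2))
      (List.replicate ((cs.length + 149) / 150) ((0, 0, 0) : Int × Int × Int))
    = (pvChunks cs).map pvTri := by
  induction cs using pvChunks.induct with
  | case1 => simp [pvChunks, PySem.List.enumerate]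
  | case2 c rest ih =>
    have hsplit : PySem.List.enumerate (c :: rest) 0
        = PySem.List.enumerate ((c :: rest).take 150) 0
          ++ PySem.List.enumerate ((c :: rest).drop 150) (((c :: rest).take 150).length : Int) := by
      conv_lhs => rw [← List.take_append_drop 150 (c :: rest)]
      rw [PySem.List.enumerate_append]
      norm_num
    rw [hsplit, List.foldl_append]
    by_cases hsmall : (c :: rest).length ≤ 150
    · have hsmall' : rest.length + 1 ≤ 150 := by simpa using hsmall
      have hdrop : (c :: rest).drop 150 = [] := by
        rw [List.drop_eq_nil_iff]
        simp only [List.length_cons]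
        omega
      have hrep : ((c :: rest).length + 149) / 150 = 1 := by
        simp only [List.length_cons]
        omega
      rw [hrep, hdrop, List.replicate_one,
        pvHead0 _ (by simp) _ _, pvPerLayer, pvChunks, hdrop, pvChunks]
      simp [pvTri]
    · have hsmall' : 150 < rest.length + 1 := by
        simp only [List.length_cons, not_le] at hsmall
        exact hsmall
      have htake : (((c :: rest).take 150).length : Int) = 150 := by
        simp only [List.length_take, List.length_cons]
        omega
      have hrep : ((c :: rest).length + 149) / 150
          = (((c :: rest).drop 150).length + 149) / 150 + 1 := by
        simp only [List.length_drop, List.length_cons]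
        omega
      rw [hrep, List.replicate_succ, pvHead0 _ (by simp) _ _, pvPerLayer, htake,
        pvShift0, ih, pvChunks]
      simp [pvTri]

theorem pvRange150_cons (n : Int) (hn : 0 < n) :
    PySem.List.pyRange 0 n 150 = 0 :: (PySem.List.pyRange 0 (n - 150) 150).map (· + 150) := by
  rw [PySem.List.pyRange_of_pos 0 n (by norm_num),
    PySem.List.pyRange_of_pos 0 (n - 150) (by norm_num)]
  have hc : (if (0 : Int) < n then ((n - 0 + 150 - 1) / 150).toNat else 0)
      = (if (0 : Int) < n - 150 then ((n - 150 - 0 + 150 - 1) / 150).toNat else 0) + 1 := by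
    split_ifs <;> omega
  rw [hc, List.range_succ_eq_map]
  simp only [List.map_cons, List.map_map]
  refine List.cons_eq_cons.mpr ⟨by norm_num, ?_⟩
  apply List.map_congr_left
  intro k _
  simp only [Function.comp_apply]
  push_cast
  ring

-- A's slicing loop produces the same layers.
theorem pvLayersMain (cs : List Char) :
    (PySem.List.pyRange 0 (cs.length : Int) 150).map
      (fun idx => PySem.List.slice cs (some idx) (some (idx + 150)))
    = pvChunks cs := by
  induction cs using pvChunks.induct with
  | case1 => simp [pvChunks, PySem.List.pyRange_of_pos]
  | case2 c rest ih =>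
    have hn : (0 : Int) < (((c :: rest).length : Nat) : Int) := by
      simp
    rw [pvRange150_cons _ hn, List.map_cons, List.map_map, pvChunks]
    congr 1
    · rw [PySem.List.slice_toNat]
      all_goals norm_num
      rw [show Int.toNat 150 = 149 + 1 from rfl, List.take_succ_cons]
    · have hlen : PySem.List.pyRange 0 ((((c :: rest).length : Nat) : Int) - 150) 150
          = PySem.List.pyRange 0 (((((c :: rest).drop 150).length : Nat)) : Int) 150 := by
        by_cases hge : 150 ≤ (c :: rest).length
        · congr 1
          simp only [List.length_drop]
          omega
        · rw [PySem.List.pyRange_of_pos _ _ (by norm_num),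
            PySem.List.pyRange_of_pos _ _ (by norm_num)]
          have h1 : ¬ ((0 : Int) < (((c :: rest).length : Nat) : Int) - 150) := by
            simp only [List.length_cons] at hge ⊢
            omega
          have h2 : ¬ ((0 : Int) < ((((c :: rest).drop 150).length : Nat) : Int)) := by
            simp only [List.length_drop, List.length_cons] at hge ⊢
            omega
          rw [if_neg h1, if_neg h2]
      rw [hlen, ← ih]
      apply List.map_congr_left
      intro i hi
      have h0i : 0 ≤ i := ((PySem.List.mem_pyRange_iff_of_pos (by norm_num) i).mp hi).1
      simp only [Function.comp_apply]
      rw [PySem.List.slice_toNat, PySem.List.slice_toNat,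
        show (i + 150 + 150).toNat - (i + 150).toNat = 150 by omega,
        show (i + 150).toNat - i.toNat = 150 by omega,
        show (i + 150).toNat = i.toNat + 150 by omega,
        List.drop_drop]
      try rw [Nat.add_comm 150 i.toNat]
      all_goals omega

-- B's initial table list is one all-zero table per layer.
theorem pvCounts0 (n : Nat) (x : Int × Int × Int) :
    (PySem.List.pyRange 0 (-(PySem.Int.floordiv (-(n : Int)) 150)) 1).map (fun _ => x)
    = List.replicate ((n + 149) / 150) x := by
  have hq : -(PySem.Int.floordiv (-(n : Int)) 150) = (((n + 149) / 150 : Nat) : Int) := by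
    rw [PySem.Int.neg_floordiv_neg_eq_iff_of_pos (by norm_num)]
    constructor <;> push_cast <;> omega
  rw [hq, PySem.List.pyRange_one, List.map_map, List.eq_replicate_iff]
  constructor
  · simp
    omega
  · intro b hb
    simp at hb
    obtain ⟨a, -, rfl⟩ := hb
    rfl

theorem pvMin?_map_aux {α β : Type} (f : α → β) (k : β → Int) (xs : List α) (acc : Option α) :
    xs.foldl (fun acc x => match acc with
      | none => some (f x)
      | some m => if k (f x) < k m then some (f x) else some m) (Option.map f acc)
    = Option.map f (xs.foldl (fun acc x => match acc with
      | none => some x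
      | some m => if k (f x) < k (f m) then some x else some m) acc) := by
  induction xs generalizing acc with
  | nil => rfl
  | cons x xs ih =>
    rw [List.foldl_cons, List.foldl_cons]
    have hstep : (match Option.map f acc with
        | none => some (f x)
        | some m => if k (f x) < k m then some (f x) else some m)
        = Option.map f (match acc with
        | none => some x
        | some m => if k (f x) < k (f m) then some x else some m) := by
      cases acc with
      | none => rfl
      | some a => by_cases hlt : k (f x) < k (f a) <;> simp [hlt]
    rw [hstep, ih]

theorem pvMin?_map {α β : Type} (f : α → β) (k : β → Int) (xs : List α) :
    PySem.List.min? (xs.map f) k = Option.map f (PySem.List.min? xs (fun x => k (f x))) := by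
  simp only [PySem.List.min?]
  rw [List.foldl_map]
  simpa using pvMin?_map_aux f k xs none

theorem pvKeyA (l : List Char) :
    (l.map (fun p => if p = '0' then (1 : Int) else 0)).sum = (pvTri l).1 := by
  rw [show (fun p => if p = '0' then (1 : Int) else 0)
      = (fun p => if (fun q => decide (q = '0')) p = true then (1 : Int) else 0) from by
    funext p; simp]
  rw [PySem.List.sum_map_ite_one_zero]
  unfold pvTri
  exact_mod_cast congrArg Nat.cast
    (List.countP_congr (fun x _ => by simp [pvChar_eq_iff x 48 '0' rfl]))

theorem pvFilters (m : List Char) :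
    ((m.filter (fun x => x = '2')).length : Int) = (pvTri m).2.2
    ∧ ((m.filter (fun x => x = '1')).length : Int) = (pvTri m).2.1 := by
  unfold pvTri
  dsimp only
  constructor
  · rw [← List.countP_eq_length_filter]
    exact_mod_cast List.countP_congr (fun x _ => by simp [pvChar_eq_iff x 50 '2' rfl])
  · rw [← List.countP_eq_length_filter]
    exact_mod_cast List.countP_congr (fun x _ => by simp [pvChar_eq_iff x 49 '1' rfl])

-- ===== VERDICT (by name: the statement is the Claim_ definition above) =====
theorem part1_spec : Claim_equal_part1 := by
  intro input_txt _ _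
  unfold Spec_part1 part1 part1_alt
  simp only [PySem.List.foldl_append_singleton_eq_map, List.nil_append,
    show ((25:Int) * 6) = 150 from rfl]
  rw [pvStep_eq, pvCounts0, pvBucketMain, pvLayersMain,
    show (fun (l : List Char) => ((l.map (fun p => if p = '0' then (1 : Int) else 0)).sum))
      = (fun l => (pvTri l).1) from funext pvKeyA,
    pvMin?_map pvTri (fun c => c.1) (pvChunks input_txt.toList)]
  cases PySem.List.min? (pvChunks input_txt.toList) (fun l => (pvTri l).1) with
  | none => rfl
  | some m =>
    simp only [Option.map_some]
    rw [(pvFilters m).1, (pvFilters m).2, Int.mul_comm]
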